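-- pv_equiv track=rewrite | github.com/michelyamagishi/Goldbach | Polynomial_coeficients.py | compute_c_m
-- ===== SOURCE A (Python) =====
-- from bisect import bisect_right
--
-- def compute_c_m(n, m, primes, isprime):
--     """
--     Implements the definition:
--
--     c_m = # { r prime | 3 ≤ r ≤ n − m, and
--                      for all p in primes < m:
--                          r + m − p NOT prime }
--     """
--     L = n - m
--     # find all primes r <= L
--     idx = bisect_right(primes, L)
--     valid_primes = primes[:idx]
--
--     # primes < m
--     idxm = bisect_right(primes, m-1)
--     small_primes = primes[:idxm]
--
--     cnt = 0
--     for r in valid_primes: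
--         if r < 3:
--             continue
--         ok = True
--         for p in small_primes:
--             if isprime[r + m - p]:
--                 ok = False
--                 break
--         if ok:
--             cnt += 1
--     return cnt
-- ===== SOURCE B (Python) =====
-- from bisect import bisect_right
--
-- def compute_c_m(n, m, primes, isprime):
--     L = n - m
--     small_primes = primes[:bisect_right(primes, m - 1)]
--     # keys of isprime whose value is truthy
--     trues = {k for k, v in isprime.items() if v}
--     # r is "bad" exactly when r + m - p is a true key for some small prime p
--     bad = {q - m + p for q in trues for p in small_primes}
--     valid_primes = primes[:bisect_right(primes, L)]
--     return sum(1 for r in valid_primes if r >= 3 and r not in bad)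
-- ===== Notes on version B (the rewrite author's own statement) =====
-- stated objective: alternative
-- what changed: Instead of A's per-candidate inner scan that looks each r+m-p up in the isprime dict (with an early break), B collects the true keys of isprime once, marks every candidate r they rule out into a 'bad' set in one prime-pair marking pass, and then counts the unmarked primes in a single lookup-free pass.
-- outside the precondition, e.g. on compute_c_m(8, 5, [2, 3], {6: True}): A returns 0, B returns 0
import Mathlib
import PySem

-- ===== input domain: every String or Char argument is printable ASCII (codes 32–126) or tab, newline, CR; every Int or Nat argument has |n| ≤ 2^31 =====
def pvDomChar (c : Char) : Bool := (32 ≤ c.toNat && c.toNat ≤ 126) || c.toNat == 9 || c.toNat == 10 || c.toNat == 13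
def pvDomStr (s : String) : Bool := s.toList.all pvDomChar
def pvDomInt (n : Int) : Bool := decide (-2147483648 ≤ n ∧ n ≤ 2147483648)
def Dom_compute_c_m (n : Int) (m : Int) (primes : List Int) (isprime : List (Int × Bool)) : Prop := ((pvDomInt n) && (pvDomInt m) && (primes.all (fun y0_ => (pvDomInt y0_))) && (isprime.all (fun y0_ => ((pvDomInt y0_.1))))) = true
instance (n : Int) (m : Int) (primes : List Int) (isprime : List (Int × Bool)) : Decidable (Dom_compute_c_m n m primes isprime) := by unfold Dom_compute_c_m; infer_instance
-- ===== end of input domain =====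

-- B replaces A's per-r scan of dict lookups by a marking pass: it collects the true keys of
-- isprime once, marks every r they rule out into a set, and counts unmarked primes in one pass
-- (objective: alternative decomposition; no dict lookups in the counting loop).

-- ===== PORT A =====
def compute_c_m (n : Int) (m : Int) (primes : List Int) (isprime : List (Int × Bool)) : Int :=
  let L := n - m
  let idx := PySem.List.bisectRight primes L
  let valid_primes := PySem.List.slice primes none (some (idx : Int))
  let idxm := PySem.List.bisectRight primes (m - 1)
  let small_primes := PySem.List.slice primes none (some (idxm : Int))
  valid_primes.foldl (fun cnt r =>
    if r < 3 then cnt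
    else
      -- inner loop with break: once ok is false the remaining iterations change nothing
      let ok := small_primes.foldl (fun ok p =>
        if ok then (if (PySem.Dict.mk isprime).getD (r + m - p) false then false else ok) else ok) true
      if ok then cnt + 1 else cnt) 0

-- ===== PORT B =====
def compute_c_m_alt (n : Int) (m : Int) (primes : List Int) (isprime : List (Int × Bool)) : Int :=
  let L := n - m
  let small_primes := PySem.List.slice primes none (some ((PySem.List.bisectRight primes (m - 1)) : Int))
  -- trues = {k for k, v in isprime.items() if v}
  let trues : PySem.Set Int := PySem.Set.ofList ((isprime.filter (fun kv => kv.2)).map (fun kv => kv.1))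
  -- bad = {q - m + p for q in trues for p in small_primes}  (consumed only by membership)
  let bad : PySem.Set Int := PySem.Set.ofList (trues.flatMap (fun q => small_primes.map (fun p => q - m + p)))
  let valid_primes := PySem.List.slice primes none (some ((PySem.List.bisectRight primes L) : Int))
  ((valid_primes.countP (fun r => decide (3 ≤ r) && !(PySem.Set.contains bad r)) : Nat) : Int)

-- ===== PRECONDITION & SPEC =====
-- Pre_ excludes inputs where some key r+m-p that A's scan can reach is missing from isprime
-- (Python A raises KeyError on these except when an earlier break skips the missing key), and
-- association lists with duplicate keys (unreachable from a Python dict, whose keys are unique).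
def Pre_compute_c_m (n : Int) (m : Int) (primes : List Int) (isprime : List (Int × Bool)) : Prop :=
  (isprime.map Prod.fst).Nodup ∧
  ∀ r ∈ PySem.List.slice primes none (some ((PySem.List.bisectRight primes (n - m)) : Int)), 3 ≤ r →
    ∀ p ∈ PySem.List.slice primes none (some ((PySem.List.bisectRight primes (m - 1)) : Int)),
      (PySem.Dict.mk isprime).contains (r + m - p) = true
instance (n : Int) (m : Int) (primes : List Int) (isprime : List (Int × Bool)) : Decidable (Pre_compute_c_m n m primes isprime) := by unfold Pre_compute_c_m; infer_instance

def pvWitness_compute_c_m : Int × Int × List Int × (List (Int × Bool)) :=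
  (10, 4, [2, 3, 5], [(4, false), (5, false), (6, false), (7, true)])

def Spec_compute_c_m (n : Int) (m : Int) (primes : List Int) (isprime : List (Int × Bool)) (out : Int) : Prop := out = compute_c_m_alt n m primes isprime
instance (n : Int) (m : Int) (primes : List Int) (isprime : List (Int × Bool)) (out : Int) : Decidable (Spec_compute_c_m n m primes isprime out) := by unfold Spec_compute_c_m; infer_instance

-- ===== CLAIM (what is proved, stated in full; the proofs are below) =====
def Claim_equal_compute_c_m : Prop := ∀ (n : Int) (m : Int) (primes : List Int) (isprime : List (Int × Bool)), Dom_compute_c_m n m primes isprime → Pre_compute_c_m n m primes isprime → Spec_compute_c_m n m primes isprime (compute_c_m n m primes isprime)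

-- ===== LEMMAS AND PROOFS =====

-- once A's inner ok is false it stays false
theorem innerA_false (f : Int → Bool) (l : List Int) :
    l.foldl (fun ok p => if ok then (if f p then false else ok) else ok) false = false := by
  induction l with
  | nil => rfl
  | cons x xs ih => simpa using ih

-- A's inner loop (with its break) computes 'all lookups false'
theorem innerA_eq_all (f : Int → Bool) (l : List Int) :
    l.foldl (fun ok p => if ok then (if f p then false else ok) else ok) true
      = l.all (fun p => !(f p)) := by
  induction l with
  | nil => rfl
  | cons x xs ih =>
    rw [List.foldl_cons]
    cases h : f x
    · simpa [h] using ih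
    · simpa [h] using innerA_false f xs

-- A's outer loop is a conditional count
theorem outerA_eq_countP (f : Int → Bool) (l : List Int) (a : Int) :
    l.foldl (fun cnt r => if r < 3 then cnt else if f r then cnt + 1 else cnt) a
      = a + (l.countP (fun r => !(decide (r < 3)) && f r) : Int) := by
  induction l generalizing a with
  | nil => simp
  | cons x xs ih =>
    rw [List.foldl_cons, ih]
    by_cases h3 : x < 3 <;> cases hf : f x <;> simp [h3, hf] <;> ring

-- first-match lookup on a duplicate-free association list is membership
theorem get?_mk_eq_some_true_iff (l : List (Int × Bool)) (k : Int)
    (h : (l.map Prod.fst).Nodup) :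
    (PySem.Dict.mk l).get? k = some true ↔ (k, true) ∈ l := by
  induction l with
  | nil => simp [PySem.Dict.get?]
  | cons kv rest ih =>
    obtain ⟨a, v⟩ := kv
    simp only [List.map_cons, List.nodup_cons] at h
    rw [PySem.Dict.get?_mk_cons]
    by_cases hak : a = k
    · subst hak
      rw [if_pos (by simp)]
      simp only [List.mem_cons]
      constructor
      · intro hv
        left
        cases v
        · exact absurd hv (by simp)
        · rfl
      · rintro (hv | hv)
        · cases hv; rfl
        · exact absurd (List.mem_map_of_mem (f := Prod.fst) hv) h.1
    · rw [if_neg (by simp [hak]), ih h.2]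
      simp only [List.mem_cons]
      constructor
      · exact Or.inr
      · rintro (hv | hv)
        · cases hv; exact absurd rfl hak
        · exact hv

theorem getD_mk_true_iff (l : List (Int × Bool)) (k : Int)
    (h : (l.map Prod.fst).Nodup) :
    ((PySem.Dict.mk l).getD k false = true) ↔ (k, true) ∈ l := by
  rw [← get?_mk_eq_some_true_iff l k h]
  cases hq : (PySem.Dict.mk l).get? k with
  | none => simp [PySem.Dict.getD, hq]
  | some v => cases v <;> simp [PySem.Dict.getD, hq]

theorem compute_c_m_spec : Claim_equal_compute_c_m := by
  intro n m primes isprime _ hpre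
  unfold Spec_compute_c_m compute_c_m compute_c_m_alt
  simp only []
  rw [outerA_eq_countP, zero_add]
  set small := PySem.List.slice primes none (some ((PySem.List.bisectRight primes (m - 1)) : Int)) with hsmall
  set valid := PySem.List.slice primes none (some ((PySem.List.bisectRight primes (n - m)) : Int)) with hvalid
  congr 1
  apply List.countP_congr
  intro r _
  rw [innerA_eq_all]
  have hdec : (!decide (r < 3)) = decide (3 ≤ r) := by
    by_cases h : r < 3 <;> simp [h] <;> omega
  rw [hdec]
  have hbad : (PySem.Set.contains (PySem.Set.ofList
      ((PySem.Set.ofList ((isprime.filter (fun kv => kv.2)).map (fun kv => kv.1))).flatMap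
        (fun q => small.map (fun p => q - m + p)))) r = true)
      ↔ ∃ p ∈ small, (PySem.Dict.mk isprime).getD (r + m - p) false = true := by
    simp only [PySem.Set.contains, List.contains_iff_mem, PySem.Set.mem_ofList,
      List.mem_flatMap, List.mem_map, List.mem_filter]
    constructor
    · rintro ⟨q, ⟨⟨kq, vq⟩, ⟨hkv, hv⟩, rfl⟩, p, hp, rfl⟩
      refine ⟨p, hp, ?_⟩
      have heq : kq - m + p + m - p = kq := by ring
      rw [heq, getD_mk_true_iff isprime _ hpre.1]
      cases vq
      · exact absurd hv (by simp)
      · exact hkv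
    · rintro ⟨p, hp, hlook⟩
      rw [getD_mk_true_iff isprime _ hpre.1] at hlook
      exact ⟨r + m - p, ⟨(r + m - p, true), ⟨hlook, rfl⟩, rfl⟩, p, hp, by ring⟩
  have hiff : ((small.all (fun p => !((PySem.Dict.mk isprime).getD (r + m - p) false))) = true)
      ↔ ((!PySem.Set.contains (PySem.Set.ofList
          ((PySem.Set.ofList ((isprime.filter (fun kv => kv.2)).map (fun kv => kv.1))).flatMap
            (fun q => small.map (fun p => q - m + p)))) r) = true) := by
    rw [Bool.not_eq_true', ← Bool.not_eq_true, hbad, List.all_eq_true]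
    constructor
    · intro hall hex
      obtain ⟨p, hp, hl⟩ := hex
      have h2 := hall p hp
      rw [hl] at h2
      exact absurd h2 (by simp)
    · intro hnot p hp
      cases hl : (PySem.Dict.mk isprime).getD (r + m - p) false
      · rfl
      · exact absurd ⟨p, hp, hl⟩ hnot
  rw [Bool.eq_iff_iff, Bool.and_eq_true, Bool.and_eq_true, hiff]
  simp
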